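-- pv_equiv track=rewrite | github.com/raeez/chiral-bar-cobar | compute/lib/bar_presentation_koszul_dual_engine.py | betagamma_dual_dim
-- ===== SOURCE A (Python) =====
-- def betagamma_dual_dim(n: int) -> int:
--     """dim(betagamma^!)_n = dim H^1_n(B(betagamma)).
--
--     The Koszul dual of betagamma is the bc system.
--     Known formula: h(n) = [x^n] sqrt((1+x)/(1-3x)).
--     Recurrence: n*h(n) = 2n*h(n-1) + 3(n-2)*h(n-2), h(0)=1, h(1)=2.
--     Values: 2, 4, 10, 26, 70, 192, ...
--     """
--     if n < 1:
--         return 0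
--     a = [1, 2]  # a[0] = 1, a[1] = 2
--     while len(a) <= n:
--         k = len(a)
--         a.append((2 * k * a[k - 1] + 3 * (k - 2) * a[k - 2]) // k)
--     return a[n]
-- ===== SOURCE B (Python) =====
-- def central_trinomial(m: int) -> int:
--     """Central trinomial coefficient T(m) = sum_k C(m,2k)*C(2k,k), summing the
--     binomial terms with each term obtained from the previous by its exact ratio."""
--     total = 1
--     term = 1  # C(m, 0) * C(0, 0)
--     for k in range(m // 2):
--         term = term * (m - 2 * k) * (m - 2 * k - 1) // ((k + 1) * (k + 1))
--         total += term
--     return total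
--
--
-- def betagamma_dual_dim(n: int) -> int:
--     if n < 1:
--         return 0
--     return central_trinomial(n) + central_trinomial(n - 1)
-- ===== Notes on version B (the rewrite author's own statement) =====
-- stated objective: alternative
-- what changed: Replaces the two-term P-recurrence loop (with its floor division) by a closed binomial summation: h(n) = T(n) + T(n-1) where T(m) = sum_k C(m,2k)*C(2k,k) is the central trinomial coefficient, with binomials computed by the exact multiplicative product formula.
import Mathlib
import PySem

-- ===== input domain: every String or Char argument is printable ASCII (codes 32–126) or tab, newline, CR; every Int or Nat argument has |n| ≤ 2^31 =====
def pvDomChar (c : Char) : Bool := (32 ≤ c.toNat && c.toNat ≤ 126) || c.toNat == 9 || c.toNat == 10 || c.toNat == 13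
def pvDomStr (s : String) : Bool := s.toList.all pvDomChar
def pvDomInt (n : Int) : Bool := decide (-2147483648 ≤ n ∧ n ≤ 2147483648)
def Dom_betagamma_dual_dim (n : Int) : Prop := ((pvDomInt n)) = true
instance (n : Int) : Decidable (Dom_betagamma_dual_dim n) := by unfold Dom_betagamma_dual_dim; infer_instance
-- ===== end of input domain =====

-- B replaces A's two-term P-recurrence loop by the closed binomial summation
-- h(n) = T(n) + T(n-1), T(m) = Σ_k C(m,2k)·C(2k,k) (central trinomial coefficient);
-- objective: alternative algorithm (not faster).

-- ===== PORT A =====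
-- one iteration of A's while-loop body: k = len(a); a.append((2*k*a[k-1] + 3*(k-2)*a[k-2]) // k)
-- (indices k-1, k-2 are always in range since len(a) ≥ 2, so List.getD is exact here)
def pvA_step (a : List Int) : List Int :=
  let k : Int := a.length
  a ++ [PySem.Int.floordiv (2 * k * a.getD (a.length - 1) 0 + 3 * (k - 2) * a.getD (a.length - 2) 0) k]

-- the while-loop: it runs exactly (n+1) - 2 times, growing a from length 2 to length n+1
def pvA_loop : Nat → List Int → List Int
  | 0, a => a
  | s+1, a => pvA_loop s (pvA_step a)

def betagamma_dual_dim (n : Int) : Int :=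
  if n < 1 then 0
  else (pvA_loop (n.toNat - 1) [1, 2]).getD n.toNat 0

-- ===== PORT B =====
-- central_trinomial(m): total = 1; term = 1; for k in range(m//2):
--   term = term * (m-2k) * (m-2k-1) // ((k+1)*(k+1)); total += term; return total
def central_trinomial (m : Int) : Int :=
  ((PySem.List.pyRange 0 (PySem.Int.floordiv m 2) 1).foldl
    (fun st k =>
      let term := PySem.Int.floordiv (st.2 * (m - 2 * k) * (m - 2 * k - 1)) ((k + 1) * (k + 1))
      (st.1 + term, term))
    ((1 : Int), (1 : Int))).1

def betagamma_dual_dim_alt (n : Int) : Int :=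
  if n < 1 then 0
  else central_trinomial n + central_trinomial (n - 1)

-- ===== PRECONDITION & SPEC =====
def Spec_betagamma_dual_dim (n : Int) (out : Int) : Prop := out = betagamma_dual_dim_alt n
instance (n : Int) (out : Int) : Decidable (Spec_betagamma_dual_dim n out) := by unfold Spec_betagamma_dual_dim; infer_instance

-- ===== CLAIM (what is proved, stated in full; the proofs are below) =====
def Claim_equal_betagamma_dual_dim : Prop := ∀ (n : Int), Dom_betagamma_dual_dim n → Spec_betagamma_dual_dim n (betagamma_dual_dim n)

-- ===== LEMMAS AND PROOFS =====

-- the summand of the central trinomial sum, as an integer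
def pvF (m k : ℕ) : ℤ := (m.choose (2 * k) : ℤ) * ((2 * k).choose k : ℤ)

-- T(m), the central trinomial coefficient as B computes it
def pvT (m : ℕ) : ℤ := ∑ k ∈ Finset.range (m / 2 + 1), pvF m k

-- telescoping certificate function (Zeilberger certificate for the P-recurrence of T)
def pvPsi (m : ℕ) : ℕ → ℤ
  | 0 => 0
  | j + 1 => (-4) * ((m : ℤ) + 1 - 2 * j) * (((m + 1).choose (2 * j) : ℤ)) * (((2 * j).choose j : ℤ))

-- the sequence A's list holds: a[0] = 1 and a[m] = T(m) + T(m-1) for m ≥ 1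
def pvH : ℕ → ℤ
  | 0 => 1
  | m + 1 => pvT (m + 1) + pvT m

-- top-index absorption: (a+1-b)·C(a+1,b) = (a+1)·C(a,b)
theorem pv_abs_top (a b : ℕ) : (a + 1 - b) * (a + 1).choose b = (a + 1) * a.choose b := by
  calc (a + 1 - b) * (a + 1).choose b = (a + 1).choose b * (a + 1 - b) := by ring
    _ = (a + 1).choose (b + 1) * (b + 1) := (Nat.choose_succ_right_eq (a + 1) b).symm
    _ = (a + 1) * a.choose b := by rw [← Nat.add_one_mul_choose_eq a b]

-- central binomial step: (j+1)·C(2j+2, j+1) = 2·(2j+1)·C(2j, j)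
theorem pv_cb (j : ℕ) : (j + 1) * (2 * j + 2).choose (j + 1) = 2 * (2 * j + 1) * (2 * j).choose j := by
  have hsymm : (2 * j + 1).choose (j + 1) = (2 * j + 1).choose j := by
    have h := Nat.choose_symm (n := 2 * j + 1) (k := j) (by omega)
    have he : 2 * j + 1 - j = j + 1 := by omega
    rw [he] at h
    exact h
  have hpascal : (2 * j + 2).choose (j + 1) = 2 * ((2 * j + 1).choose j) := by
    have h := Nat.choose_succ_succ (2 * j + 1) j
    simp only [Nat.succ_eq_add_one] at h
    have he : (2 * j + 1 + 1) = 2 * j + 2 := by omega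
    rw [he] at h
    rw [h, hsymm]; ring
  have habs2 : (j + 1) * (2 * j + 1).choose j = (2 * j + 1) * (2 * j).choose j := by
    have h := pv_abs_top (2 * j) j
    have he : 2 * j + 1 - j = j + 1 := by omega
    rw [he] at h
    exact h
  rw [hpascal]
  calc (j + 1) * (2 * ((2 * j + 1).choose j)) = 2 * ((j + 1) * (2 * j + 1).choose j) := by ring
    _ = 2 * ((2 * j + 1) * (2 * j).choose j) := by rw [habs2]
    _ = 2 * (2 * j + 1) * (2 * j).choose j := by ring

-- ℤ-cast of pv_cb, with the indices written as 2*(j+1)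
theorem pv_cbZ (j : ℕ) :
    ((j : ℤ) + 1) * ((2 * (j + 1)).choose (j + 1) : ℤ) = 2 * (2 * (j : ℤ) + 1) * ((2 * j).choose j : ℤ) := by
  have h := pv_cb j
  have he : 2 * (j + 1) = 2 * j + 2 := by omega
  rw [he]
  exact_mod_cast congrArg (fun t : ℕ => (t : ℤ)) h

-- ℤ-cast of top-index absorption (b ≤ a+1)
theorem pv_abs_topZ (a b : ℕ) (hb : b ≤ a + 1) :
    ((a : ℤ) + 1 - b) * ((a + 1).choose b : ℤ) = ((a : ℤ) + 1) * (a.choose b : ℤ) := by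
  have h := pv_abs_top a b
  have h2 : (((a + 1 - b) * (a + 1).choose b : ℕ) : ℤ) = (((a + 1) * a.choose b : ℕ) : ℤ) := by
    exact_mod_cast congrArg (fun t : ℕ => (t : ℤ)) h
  push_cast [Nat.cast_sub hb] at h2
  linear_combination h2

-- the pointwise certificate identity
theorem pv_cert (m k : ℕ) :
    ((m : ℤ) + 2) * pvF (m + 2) k - (2 * (m : ℤ) + 3) * pvF (m + 1) k - 3 * ((m : ℤ) + 1) * pvF m k
      = pvPsi m (k + 1) - pvPsi m k := by
  match k with
  | 0 =>
    simp [pvF, pvPsi]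
    ring
  | j + 1 =>
    rcases (by omega : 2 * (j + 1) ≤ m ∨ 2 * (j + 1) = m + 1 ∨ 2 * (j + 1) = m + 2 ∨ m + 3 ≤ 2 * (j + 1)) with hc | hc | hc | hc
    · -- generic case: 2k ≤ m
      simp only [pvF, pvPsi]
      push_cast
      -- integer facts from choose identities
      have e3 := pv_abs_topZ (m + 1) (2 * (j + 1)) (by omega)
      have e4 := pv_abs_topZ m (2 * (j + 1)) (by omega)
      have e2 := pv_cbZ j
      -- e1 : (2j+2)(2j+1)·C(m+1,2j+2) = (m-2j)(m+1-2j)·C(m+1,2j)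
      have hA2n := Nat.choose_succ_right_eq (m + 1) (2 * j + 1)
      have hA1n := Nat.choose_succ_right_eq (m + 1) (2 * j)
      have hA2 : ((m + 1).choose (2 * j + 2) : ℤ) * (2 * (j : ℤ) + 2) = ((m + 1).choose (2 * j + 1) : ℤ) * ((m : ℤ) - 2 * j) := by
        have h2 : (((m + 1).choose (2 * j + 1 + 1) * (2 * j + 1 + 1) : ℕ) : ℤ) = (((m + 1).choose (2 * j + 1) * (m + 1 - (2 * j + 1)) : ℕ) : ℤ) :=
          congrArg _ hA2n
        push_cast [Nat.cast_sub (show 2 * j + 1 ≤ m + 1 by omega), Nat.cast_sub (show 2 * j ≤ m by omega)] at h2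
        have he : 2 * j + 1 + 1 = 2 * j + 2 := by omega
        rw [he] at h2
        linear_combination h2
      have hA1 : ((m + 1).choose (2 * j + 1) : ℤ) * (2 * (j : ℤ) + 1) = ((m + 1).choose (2 * j) : ℤ) * ((m : ℤ) + 1 - 2 * j) := by
        have h2 : (((m + 1).choose (2 * j + 1) * (2 * j + 1) : ℕ) : ℤ) = (((m + 1).choose (2 * j) * (m + 1 - 2 * j) : ℕ) : ℤ) :=
          congrArg _ hA1n
        push_cast [Nat.cast_sub (show 2 * j ≤ m + 1 by omega)] at h2
        linear_combination h2
      have he1 : 2 * (j + 1) = 2 * j + 2 := by omega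
      rw [he1] at e3 e4 ⊢
      push_cast at e3 e4
      have e1 : (2 * (j : ℤ) + 2) * (2 * (j : ℤ) + 1) * ((m + 1).choose (2 * j + 2) : ℤ)
          = ((m : ℤ) - 2 * j) * ((m : ℤ) + 1 - 2 * j) * ((m + 1).choose (2 * j) : ℤ) := by
        linear_combination (2 * (j : ℤ) + 1) * hA2 + ((m : ℤ) - 2 * j) * hA1
      -- h2 : k²·x·y = (m+2-2k)(m+3-2k)·u·v
      have e2' : ((j : ℤ) + 1) * ((2 * j + 2).choose (j + 1) : ℤ) = 2 * (2 * (j : ℤ) + 1) * ((2 * j).choose j : ℤ) := by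
        rw [he1] at e2; exact e2
      have h2' : (2 * (2 * (j : ℤ) + 1)) * (((j : ℤ) + 1) ^ 2 * ((m + 1).choose (2 * j + 2) : ℤ) * ((2 * j + 2).choose (j + 1) : ℤ))
          = (2 * (2 * (j : ℤ) + 1)) * (((m : ℤ) - 2 * j) * ((m : ℤ) + 1 - 2 * j) * ((m + 1).choose (2 * j) : ℤ) * ((2 * j).choose j : ℤ)) := by
        linear_combination (((j : ℤ) + 1) * ((2 * j + 2).choose (j + 1) : ℤ)) * e1 + (((m : ℤ) - 2 * j) * ((m : ℤ) + 1 - 2 * j) * ((m + 1).choose (2 * j) : ℤ)) * e2'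
      have hne : (2 * (2 * (j : ℤ) + 1)) ≠ 0 := by
        have : (0 : ℤ) ≤ (j : ℤ) := Int.natCast_nonneg j
        omega
      have h2 := mul_left_cancel₀ hne h2'
      -- final cancellation by (m+2-2k)(m+1)
      have hPQ : (((m : ℤ) - 2 * j) * ((m : ℤ) + 1)) ≠ 0 := by
        have h0 : (2 * (j : ℤ) + 2) ≤ (m : ℤ) := by exact_mod_cast hc
        have : (0 : ℤ) ≤ (j : ℤ) := Int.natCast_nonneg j
        have hm0 : (0 : ℤ) ≤ (m : ℤ) := Int.natCast_nonneg m
        intro hcon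
        rcases mul_eq_zero.mp hcon with h | h <;> omega
      apply mul_left_cancel₀ hPQ
      linear_combination (((m : ℤ) + 1) * ((m : ℤ) + 2) * ((2 * j + 2).choose (j + 1) : ℤ)) * e3
        + (3 * ((m : ℤ) + 1) * ((m : ℤ) - 2 * j) * ((2 * j + 2).choose (j + 1) : ℤ)) * e4
        + (4 * ((m : ℤ) + 1)) * h2
    · -- 2k = m+1 (m = 2j+1 odd)
      have hm : m = 2 * j + 1 := by omega
      subst hm
      simp only [pvF, pvPsi]
      have he1 : 2 * (j + 1) = 2 * j + 2 := by omega
      rw [he1]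
      have c3 : (2 * j + 1).choose (2 * j + 2) = 0 := Nat.choose_eq_zero_of_lt (by omega)
      have cw : (2 * j + 1 + 2).choose (2 * j + 2) = 2 * j + 3 := by
        have h := Nat.choose_symm (n := 2 * j + 3) (k := 1) (by omega)
        have he : 2 * j + 3 - 1 = 2 * j + 2 := by omega
        rw [he, Nat.choose_one_right] at h
        have he2 : 2 * j + 1 + 2 = 2 * j + 3 := by omega
        rw [he2]
        exact h
      have cx : (2 * j + 1 + 1).choose (2 * j + 2) = 1 := by
        have he2 : 2 * j + 1 + 1 = 2 * j + 2 := by omega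
        rw [he2, Nat.choose_self]
      have cu : (2 * j + 1 + 1).choose (2 * j) = (j + 1) * (2 * j + 1) := by
        have h := Nat.choose_symm (n := 2 * j + 2) (k := 2) (by omega)
        have he : 2 * j + 2 - 2 = 2 * j := by omega
        rw [he] at h
        have h2 := Nat.choose_succ_right_eq (2 * j + 2) 1
        rw [Nat.choose_one_right] at h2
        simp only [show (1 : ℕ) + 1 = 2 from rfl] at h2
        have he2 : 2 * j + 1 + 1 = 2 * j + 2 := by omega
        rw [he2, h]
        have he3 : 2 * j + 2 - 1 = 2 * j + 1 := by omega
        rw [he3] at h2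
        have h4 : (2 * j + 2).choose 2 * 2 = (j + 1) * (2 * j + 1) * 2 := by rw [h2]; ring
        exact Nat.eq_of_mul_eq_mul_right (by norm_num) h4
      rw [c3, cw, cx, cu]
      have e2 := pv_cbZ j
      rw [he1] at e2
      push_cast
      linear_combination (4 * ((j : ℤ) + 1)) * e2
    · -- 2k = m+2 (m = 2j even)
      have hm : m = 2 * j := by omega
      subst hm
      simp only [pvF, pvPsi]
      have he1 : 2 * (j + 1) = 2 * j + 2 := by omega
      rw [he1]
      have cw : (2 * j + 2).choose (2 * j + 2) = 1 := Nat.choose_self _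
      have cx : (2 * j + 1).choose (2 * j + 2) = 0 := Nat.choose_eq_zero_of_lt (by omega)
      have cz : (2 * j).choose (2 * j + 2) = 0 := Nat.choose_eq_zero_of_lt (by omega)
      have cu : (2 * j + 1).choose (2 * j) = 2 * j + 1 := by
        have h := Nat.choose_symm (n := 2 * j + 1) (k := 1) (by omega)
        have he : 2 * j + 1 - 1 = 2 * j := by omega
        rw [he, Nat.choose_one_right] at h
        exact h
      rw [cw, cx, cz, cu]
      have e2 := pv_cbZ j
      rw [he1] at e2
      push_cast
      linear_combination 2 * e2
    · -- 2k ≥ m+3: everything vanishes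
      have c1 : (m + 2).choose (2 * (j + 1)) = 0 := Nat.choose_eq_zero_of_lt (by omega)
      have c2 : (m + 1).choose (2 * (j + 1)) = 0 := Nat.choose_eq_zero_of_lt (by omega)
      have c3 : m.choose (2 * (j + 1)) = 0 := Nat.choose_eq_zero_of_lt (by omega)
      simp only [pvF, pvPsi, c1, c2, c3]
      rcases (by omega : 2 * j = m + 1 ∨ m + 2 ≤ 2 * j) with hj | hj
      · have hco : ((m : ℤ) + 1 - 2 * j) = 0 := by
          have : (2 * (j : ℤ)) = (m : ℤ) + 1 := by exact_mod_cast hj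
          omega
        rw [hco]
        push_cast
        ring
      · have c4 : (m + 1).choose (2 * j) = 0 := Nat.choose_eq_zero_of_lt (by omega)
        rw [c4]
        push_cast
        ring

-- summing pvF over a longer range changes nothing (the extra binomials vanish)
theorem pv_T_ext (m K : ℕ) (h : m / 2 + 1 ≤ K) : pvT m = ∑ k ∈ Finset.range K, pvF m k := by
  unfold pvT
  apply Finset.sum_subset (by intro x hx; simp only [Finset.mem_range] at hx ⊢; omega)
  intro k hk hnk
  simp only [Finset.mem_range] at hk hnk
  have hlt : m < 2 * k := by omega
  simp [pvF, Nat.choose_eq_zero_of_lt hlt]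

-- T's P-recurrence: (m+2)·T(m+2) = (2m+3)·T(m+1) + 3(m+1)·T(m)
theorem pv_TP (m : ℕ) :
    ((m : ℤ) + 2) * pvT (m + 2) = (2 * (m : ℤ) + 3) * pvT (m + 1) + 3 * ((m : ℤ) + 1) * pvT m := by
  have tele : ∑ k ∈ Finset.range (m / 2 + 2),
      (((m : ℤ) + 2) * pvF (m + 2) k - (2 * (m : ℤ) + 3) * pvF (m + 1) k - 3 * ((m : ℤ) + 1) * pvF m k)
      = pvPsi m (m / 2 + 2) - pvPsi m 0 := by
    rw [← Finset.sum_range_sub (pvPsi m) (m / 2 + 2)]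
    exact Finset.sum_congr rfl (fun k _ => pv_cert m k)
  have hend : pvPsi m (m / 2 + 2) = 0 := by
    show pvPsi m (m / 2 + 1 + 1) = 0
    by_cases hpar : m % 2 = 0
    · have hlt : m + 1 < 2 * (m / 2 + 1) := by omega
      simp [pvPsi, Nat.choose_eq_zero_of_lt hlt]
    · have hco : ((m : ℤ) + 1 - 2 * ((m / 2 + 1 : ℕ) : ℤ)) = 0 := by
        have : ((m / 2 + 1 : ℕ) : ℤ) * 2 = (m : ℤ) + 1 := by
          have : (m / 2 + 1) * 2 = m + 1 := by omega
          exact_mod_cast this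
        omega
      simp only [pvPsi]
      push_cast
      rw [show ((m : ℤ) + 1 - 2 * ((m : ℤ) / 2 + 1)) = 0 from by omega]
      ring
  have hsplit : ∑ k ∈ Finset.range (m / 2 + 2),
      (((m : ℤ) + 2) * pvF (m + 2) k - (2 * (m : ℤ) + 3) * pvF (m + 1) k - 3 * ((m : ℤ) + 1) * pvF m k)
      = ((m : ℤ) + 2) * ∑ k ∈ Finset.range (m / 2 + 2), pvF (m + 2) k
        - (2 * (m : ℤ) + 3) * ∑ k ∈ Finset.range (m / 2 + 2), pvF (m + 1) k
        - 3 * ((m : ℤ) + 1) * ∑ k ∈ Finset.range (m / 2 + 2), pvF m k := by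
    rw [Finset.mul_sum, Finset.mul_sum, Finset.mul_sum, ← Finset.sum_sub_distrib, ← Finset.sum_sub_distrib]
  rw [pv_T_ext (m + 2) (m / 2 + 2) (by omega), pv_T_ext (m + 1) (m / 2 + 2) (by omega),
    pv_T_ext m (m / 2 + 2) (by omega)]
  have hz : pvPsi m 0 = 0 := rfl
  rw [hsplit, hend, hz] at tele
  linarith [tele]

-- A's recurrence holds for H: L·H(L) = 2L·H(L-1) + 3(L-2)·H(L-2) for L ≥ 2
theorem pv_Hrec (L : ℕ) (hL : 2 ≤ L) :
    (L : ℤ) * pvH L = 2 * (L : ℤ) * pvH (L - 1) + 3 * ((L : ℤ) - 2) * pvH (L - 2) := by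
  rcases Nat.lt_or_ge L 3 with h3 | h3
  · have hL2 : L = 2 := by omega
    subst hL2
    norm_num [pvH, pvT, pvF, Finset.sum_range_succ]
  · obtain ⟨M, rfl⟩ : ∃ M, L = M + 3 := ⟨L - 3, by omega⟩
    have h1 : M + 3 - 1 = M + 2 := by omega
    have h2 : M + 3 - 2 = M + 1 := by omega
    rw [h1, h2]
    simp only [pvH]
    have t1 := pv_TP (M + 1)
    have t2 := pv_TP M
    rw [show M + 1 + 2 = M + 3 by omega, show M + 1 + 1 = M + 2 by omega] at t1
    push_cast at t1 t2 ⊢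
    linear_combination t1 + t2

-- the loop invariant for A
theorem pv_loop_inv (s : ℕ) :
    ∀ (a : List Int), 2 ≤ a.length → (∀ i, i < a.length → a.getD i 0 = pvH i) →
      (pvA_loop s a).length = a.length + s ∧
        ∀ i, i < a.length + s → (pvA_loop s a).getD i 0 = pvH i := by
  induction s with
  | zero =>
    intro a h2 hinv
    exact ⟨by simp [pvA_loop], fun i hi => hinv i (by omega)⟩
  | succ s ih =>
    intro a h2 hinv
    have hstep_len : (pvA_step a).length = a.length + 1 := by
      simp [pvA_step]
    have hval : (pvA_step a).getD a.length 0 = pvH a.length := by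
      have hL : (0 : ℤ) < (a.length : ℤ) := by exact_mod_cast Nat.lt_of_lt_of_le (by norm_num) h2
      have hrec := pv_Hrec a.length h2
      have hm1 : a.getD (a.length - 1) 0 = pvH (a.length - 1) := hinv _ (by omega)
      have hm2 : a.getD (a.length - 2) 0 = pvH (a.length - 2) := hinv _ (by omega)
      simp only [pvA_step]
      rw [List.getD_eq_getElem?_getD, List.getElem?_append_right (by omega)]
      simp only [Nat.sub_self]
      rw [hm1, hm2]
      have harg : 2 * (a.length : ℤ) * pvH (a.length - 1) + ((a.length : ℤ) - 2) * pvH (a.length - 2) * 3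
          = (a.length : ℤ) * pvH a.length := by linear_combination -hrec
      rw [show (2 * (a.length : ℤ) * pvH (a.length - 1) + 3 * ((a.length : ℤ) - 2) * pvH (a.length - 2))
          = (a.length : ℤ) * pvH a.length from by linear_combination -(1 : ℤ) * hrec]
      rw [PySem.Int.floordiv_eq_ediv_of_pos hL]
      simp [Int.mul_ediv_cancel_left _ (by omega : (a.length : ℤ) ≠ 0)]
    have hinv' : ∀ i, i < (pvA_step a).length → (pvA_step a).getD i 0 = pvH i := by
      intro i hi
      rw [hstep_len] at hi
      rcases (by omega : i < a.length ∨ i = a.length) with hlt | rfl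
      · have : (pvA_step a).getD i 0 = a.getD i 0 := by
          simp only [pvA_step]
          rw [List.getD_eq_getElem?_getD, List.getElem?_append_left hlt, ← List.getD_eq_getElem?_getD]
        rw [this]
        exact hinv i hlt
      · exact hval
    obtain ⟨hl, hv⟩ := ih (pvA_step a) (by omega) hinv'
    constructor
    · show (pvA_loop s (pvA_step a)).length = a.length + (s + 1)
      rw [hl, hstep_len]; omega
    · intro i hi
      show (pvA_loop s (pvA_step a)).getD i 0 = pvH i
      exact hv i (by omega)

-- term ratio of the binomial sum: f(m,k)·(m-2k)(m-2k-1) = (k+1)²·f(m,k+1)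
theorem pv_ratioZ (m k : ℕ) (h : 2 * k + 2 ≤ m) :
    pvF m k * ((m : ℤ) - 2 * k) * ((m : ℤ) - 2 * k - 1)
      = (((k : ℤ) + 1) * ((k : ℤ) + 1)) * pvF m (k + 1) := by
  simp only [pvF]
  have he1 : 2 * (k + 1) = 2 * k + 2 := by omega
  rw [he1]
  have hB1n := Nat.choose_succ_right_eq m (2 * k)
  have hB2n := Nat.choose_succ_right_eq m (2 * k + 1)
  have hB1 : (m.choose (2 * k + 1) : ℤ) * (2 * (k : ℤ) + 1) = (m.choose (2 * k) : ℤ) * ((m : ℤ) - 2 * k) := by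
    have h2 : ((m.choose (2 * k + 1) * (2 * k + 1) : ℕ) : ℤ) = ((m.choose (2 * k) * (m - 2 * k) : ℕ) : ℤ) :=
      congrArg _ hB1n
    push_cast [Nat.cast_sub (show 2 * k ≤ m by omega)] at h2
    linear_combination h2
  have hB2 : (m.choose (2 * k + 2) : ℤ) * (2 * (k : ℤ) + 2) = (m.choose (2 * k + 1) : ℤ) * ((m : ℤ) - 2 * k - 1) := by
    have h2 : ((m.choose (2 * k + 1 + 1) * (2 * k + 1 + 1) : ℕ) : ℤ) = ((m.choose (2 * k + 1) * (m - (2 * k + 1)) : ℕ) : ℤ) :=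
      congrArg _ hB2n
    push_cast [Nat.cast_sub (show 2 * k + 1 ≤ m by omega)] at h2
    have he : 2 * k + 1 + 1 = 2 * k + 2 := by omega
    rw [he] at h2
    linear_combination h2
  have e1 : (2 * (k : ℤ) + 2) * (2 * (k : ℤ) + 1) * (m.choose (2 * k + 2) : ℤ)
      = ((m : ℤ) - 2 * k) * ((m : ℤ) - 2 * k - 1) * (m.choose (2 * k) : ℤ) := by
    linear_combination (2 * (k : ℤ) + 1) * hB2 + ((m : ℤ) - 2 * k - 1) * hB1
  have e2 := pv_cbZ k
  rw [he1] at e2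
  have hne : (2 * (2 * (k : ℤ) + 1)) ≠ 0 := by
    have := Int.natCast_nonneg k
    omega
  apply mul_left_cancel₀ hne
  linear_combination (-(2 * (2 * (k : ℤ) + 1)) * ((k : ℤ) + 1) * (m.choose (2 * k + 2) : ℤ)) * e2
    + (-(2 * (2 * (k : ℤ) + 1)) * ((2 * k).choose k : ℤ)) * e1

-- the loop invariant for B: after j steps the state is (∑_{i≤j} f(m,i), f(m,j))
theorem pv_B_loop (m : ℕ) : ∀ j, j ≤ m / 2 →
    ((PySem.List.pyRange 0 (j : ℤ) 1).foldl
      (fun st k =>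
        let term := PySem.Int.floordiv (st.2 * ((m : ℤ) - 2 * k) * ((m : ℤ) - 2 * k - 1)) ((k + 1) * (k + 1))
        (st.1 + term, term))
      ((1 : Int), (1 : Int)))
      = (∑ i ∈ Finset.range (j + 1), pvF m i, pvF m j) := by
  intro j
  induction j with
  | zero =>
    intro _
    rw [PySem.List.pyRange_one_eq_nil (by norm_num)]
    simp [pvF]
  | succ j ihj =>
    intro hj
    have hsplit : PySem.List.pyRange 0 ((j + 1 : ℕ) : ℤ) 1
        = PySem.List.pyRange 0 (j : ℤ) 1 ++ [(j : ℤ)] := by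
      rw [show (((j + 1 : ℕ) : ℤ)) = ((j : ℤ) + 1) from by push_cast; ring]
      exact PySem.List.pyRange_one_succ_right (Int.natCast_nonneg j)
    rw [hsplit, List.foldl_append, ihj (by omega)]
    simp only [List.foldl_cons, List.foldl_nil]
    have hterm : PySem.Int.floordiv (pvF m j * ((m : ℤ) - 2 * j) * ((m : ℤ) - 2 * j - 1)) (((j : ℤ) + 1) * ((j : ℤ) + 1))
        = pvF m (j + 1) := by
      rw [pv_ratioZ m j (by omega)]
      rw [PySem.Int.floordiv_eq_ediv_of_pos (by positivity)]
      exact Int.mul_ediv_cancel_left _ (by positivity)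
    rw [hterm]
    simp [Finset.sum_range_succ]

-- central_trinomial computes T
theorem pv_ct_eq (m : ℕ) : central_trinomial (m : ℤ) = pvT m := by
  unfold central_trinomial
  have h2 : PySem.Int.floordiv (m : ℤ) 2 = ((m / 2 : ℕ) : ℤ) := by
    rw [PySem.Int.floordiv_eq_ediv_of_pos (by norm_num)]
    omega
  rw [h2, pv_B_loop m (m / 2) le_rfl]
  rfl

-- ===== VERDICT (by name: the statement is the Claim_ definition above) =====
theorem betagamma_dual_dim_spec : Claim_equal_betagamma_dual_dim := by
  intro n _
  unfold Spec_betagamma_dual_dim betagamma_dual_dim betagamma_dual_dim_alt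
  by_cases h : n < 1
  · simp [h]
  · rw [if_neg h, if_neg h]
    obtain ⟨N, rfl⟩ : ∃ N : ℕ, n = (N : ℤ) := ⟨n.toNat, (Int.toNat_of_nonneg (by omega)).symm⟩
    have hN : 1 ≤ N := by exact_mod_cast (by omega : (1 : ℤ) ≤ (N : ℤ))
    have base2 : ∀ i, i < ([1, 2] : List Int).length → ([1, 2] : List Int).getD i 0 = pvH i := by
      intro i hi
      simp only [List.length_cons, List.length_nil] at hi
      interval_cases i
      · rfl
      · show (2 : ℤ) = pvH 1
        norm_num [pvH, pvT, pvF, Finset.sum_range_succ]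
    obtain ⟨hlen, hval⟩ := pv_loop_inv (N - 1) [1, 2] (by simp) base2
    have htn : ((N : ℤ)).toNat = N := Int.toNat_natCast N
    rw [htn]
    rw [hval N (by simp; omega)]
    have hB2 : central_trinomial ((N : ℤ) - 1) = pvT (N - 1) := by
      rw [show ((N : ℤ) - 1) = ((N - 1 : ℕ) : ℤ) from by push_cast [Nat.cast_sub hN]; ring]
      exact pv_ct_eq (N - 1)
    rw [pv_ct_eq N, hB2]
    obtain ⟨M, rfl⟩ : ∃ M, N = M + 1 := ⟨N - 1, by omega⟩
    show pvH (M + 1) = pvT (M + 1) + pvT (M + 1 - 1)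
    simp [pvH]
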